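-- pv_equiv track=rewrite | github.com/diegoami/DA_Hellofresh | find_recipes_with_chili.py | has_chili
-- ===== SOURCE A (Python) =====
-- def has_chili(tok_ings):
--     def one_change(first, second):
--         if first == second:
--             return True
--         if len(first) == len(second):
--             count = 0
--             for i in range(len(first)):
--                 if first[i] != second[i]:
--                     count += 1
--                     if count > 1:
--                         return False
--             return True
--         if len(second) > len(first):
--             first, second = second, first
--         gap = 0
--         if (len(first) == len(second)+1):
--             for i in range(len(second)):
--                 if first[i+gap] != second[i]:
--                    gap += 1
--                    if (gap > 1):
--                        return False
--             return True
--         return False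
--     for tok in tok_ings:
--         tokl = tok.lower()
--         if (one_change(tokl, "chili") or one_change(tokl, "chilies") ):
--             return True
--     return False
-- ===== SOURCE B (Python) =====
-- def has_chili(tok_ings):
--     targets = ("chili", "chilies")
--
--     def lev(a, b):
--         # true Levenshtein distance, suffix DP: row[j] = distance(a_suffix, b[j:])
--         row = [len(b) - j for j in range(len(b) + 1)]
--         for x in reversed(a):
--             new = [row[-1] + 1]
--             for j in range(len(b) - 1, -1, -1):
--                 new.insert(0, min(row[j + 1] + (x != b[j]), row[j] + 1, new[0] + 1))
--             row = new
--         return row[0]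
--
--     def near(tok):
--         t = tok.lower()
--         return any(abs(len(t) - len(w)) <= 1 and lev(t, w) <= 1 for w in targets)
--
--     return any(near(tok) for tok in tok_ings)
-- ===== Notes on version B (the rewrite author's own statement) =====
-- stated objective: alternative
-- what changed: Replaces the case-split index/gap-counter scan of one_change with a generic dynamic-programming Levenshtein distance (suffix DP row update) thresholded at 1, fixing the gap-scan bug that accepts distance-2 tokens.
-- intended difference: On lists containing a token whose lowercase form passes A's gap scan against 'chili'/'chilies' with a genuinely mismatching skipped position (e.g. 'chxzli': the skipped target character is never re-checked) and that is not within true edit distance 1, A returns True while B returns False; B's answer is intended since the helper is meant to test one change. — e.g. on has_chili(["chxzli"]): A returns true, B returns false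
import Mathlib
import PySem

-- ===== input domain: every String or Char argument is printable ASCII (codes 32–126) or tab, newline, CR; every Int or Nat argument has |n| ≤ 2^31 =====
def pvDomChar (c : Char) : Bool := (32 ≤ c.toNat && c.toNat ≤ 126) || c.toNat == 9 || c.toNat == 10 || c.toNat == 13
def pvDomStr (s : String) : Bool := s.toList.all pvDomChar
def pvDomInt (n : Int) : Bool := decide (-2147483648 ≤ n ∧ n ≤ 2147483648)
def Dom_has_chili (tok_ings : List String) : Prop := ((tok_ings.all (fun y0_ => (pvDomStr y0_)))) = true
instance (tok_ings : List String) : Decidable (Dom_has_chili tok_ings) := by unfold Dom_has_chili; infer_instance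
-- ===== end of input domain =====

-- B replaces A's gap-counter scan by a direct "edit distance <= 1" test (Hamming / one-deletion
-- candidates); on gap-scan-only tokens (D_ below) A returns true, B the intended false.


-- ===== PORT A =====
-- equal-length loop of one_change: count of mismatches with early exit
def eqLoop (ps : List (Char × Char)) (count : Nat) : Bool :=
  match ps with
  | [] => true
  | (a, b) :: rest =>
    if a ≠ b then
      if count + 1 > 1 then false else eqLoop rest (count + 1)
    else eqLoop rest count

-- gap loop of one_change: 'rest' is the untraversed suffix of second (so its head is second[i]);
-- f[i+gap] is exact since A's indices are always in range
def gapLoop (f : List Char) : List Char → Nat → Nat → Bool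
  | [], _, _ => true
  | c :: rest, i, gap =>
    if f[i + gap]? ≠ some c then
      if gap + 1 > 1 then false else gapLoop f rest (i + 1) (gap + 1)
    else gapLoop f rest (i + 1) gap

def oneChange (first second : List Char) : Bool :=
  if first = second then true
  else if first.length = second.length then eqLoop (first.zip second) 0
  else if second.length > first.length then
    (if second.length = first.length + 1 then gapLoop second first 0 0 else false)
  else
    (if first.length = second.length + 1 then gapLoop first second 0 0 else false)

def has_chili (tok_ings : List String) : Bool :=
  match tok_ings with
  | [] => false
  | tok :: rest =>
    let tokl := PySem.Chars.lower tok.toList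
    if oneChange tokl "chili".toList || oneChange tokl "chilies".toList then true
    else has_chili rest

-- ===== PORT B =====
-- inner DP loop of lev: walks the remaining target suffix and the matching slice of the previous
-- row in parallel, prepending as Python's insert(0, ...) does; the base is Python's [row[-1] + 1]
def newRow (x : Char) : List Char → List Int → List Int
  | y :: bs, r0 :: rs =>
    let rest := newRow x bs rs
    (min (min (rs.headD 0 + if x = y then 0 else 1) (r0 + 1)) (rest.headD 0 + 1)) :: rest
  | _, row => [row.headD 0 + 1]

def lev (a b : List Char) : Int :=
  let row0 := (List.range (b.length + 1)).map (fun j => ((b.length - j : Nat) : Int))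
  (a.foldr (fun x row => newRow x b row) row0).headD 0

-- near(tok): the length band |len t - len w| <= 1 short-circuits the DP, then lev is thresholded
def nearB (tok : String) : Bool :=
  let t := PySem.Chars.lower tok.toList
  ["chili".toList, "chilies".toList].any fun w =>
    decide (((t.length : Int) - (w.length : Int)).natAbs ≤ 1) && decide (lev t w ≤ 1)

def has_chili_alt (tok_ings : List String) : Bool :=
  tok_ings.any fun tok => nearB tok

-- ===== PRECONDITION & SPEC =====
def pvT : List String := ["chili", "chilies"]

-- the token pairs A's gap scan accepts through a skip: one list longer by one, and after deleting
-- position j from both (twice from the longer) the lists agree — the skipped target character is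
-- never re-checked
def gapAcc (f s : List Char) : Prop :=
  f.length = s.length + 1 ∧ ∃ j ≤ s.length, (f.eraseIdx j).eraseIdx j = s.eraseIdx j

-- true edit distance at most 1: equal, one deletion, one insertion, or one substitution
def closeTo (f s : List Char) : Prop :=
  f = s ∨ ∃ j < max f.length s.length,
    f.eraseIdx j = s ∨ s.eraseIdx j = f ∨ f.eraseIdx j = s.eraseIdx j

-- Exactly the lists where some lowercased token passes A's shifted-suffix gap scan against
-- "chili"/"chilies" while no token is within true edit distance 1 of either: there A returns
-- true (e.g. for "chxzli") and B returns false; B's value is the intended one, since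
-- one_change is meant to test "one change".
def D_has_chili (tok_ings : List String) : Prop :=
  (∃ t ∈ tok_ings, ∃ c ∈ pvT,
    gapAcc (PySem.Chars.lower t.toList) c.toList ∨ gapAcc c.toList (PySem.Chars.lower t.toList)) ∧
  ∀ t ∈ tok_ings, ∀ c ∈ pvT, ¬ closeTo (PySem.Chars.lower t.toList) c.toList

instance (tok_ings : List String) : Decidable (D_has_chili tok_ings) := by
  unfold D_has_chili gapAcc closeTo pvT; infer_instance

def Spec_has_chili (tok_ings : List String) (out : Bool) : Prop :=
  ¬ D_has_chili tok_ings → out = has_chili_alt tok_ings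
instance (tok_ings : List String) (out : Bool) : Decidable (Spec_has_chili tok_ings out) := by
  unfold Spec_has_chili; infer_instance

def pvDiffWitness_has_chili : List String := ["chxzli"]
def pvDiffWitnessOut_has_chili : Bool × Bool := (true, false)

-- ===== CLAIM (what is proved, stated in full; the proofs are below) =====
def Claim_unchanged_has_chili : Prop := ∀ (tok_ings : List String), Dom_has_chili tok_ings → Spec_has_chili tok_ings (has_chili tok_ings)
def Claim_changed_has_chili : Prop := Dom_has_chili (pvDiffWitness_has_chili) ∧ D_has_chili (pvDiffWitness_has_chili) ∧ has_chili (pvDiffWitness_has_chili) = pvDiffWitnessOut_has_chili.1 ∧ has_chili_alt (pvDiffWitness_has_chili) = pvDiffWitnessOut_has_chili.2 ∧ pvDiffWitnessOut_has_chili.1 ≠ pvDiffWitnessOut_has_chili.2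
def Claim_exact_has_chili : Prop := ∀ (tok_ings : List String), Dom_has_chili tok_ings → D_has_chili tok_ings → has_chili tok_ings ≠ has_chili_alt tok_ings

-- ===== LEMMAS AND PROOFS =====

-- proof-layer characterisations used to bridge the ports and hd
def gapFun (f s : List Char) : Bool :=
  (List.range (s.length + 1)).any fun j => f.take j == s.take j && f.drop (j + 2) == s.drop (j + 1)

def delFun (f s : List Char) : Bool :=
  (List.range f.length).any fun j => f.eraseIdx j == s

def guarded (g : List Char → List Char → Bool) (f s : List Char) : Bool :=
  (f.length == s.length && decide (((f.zip s).countP fun p => p.1 != p.2) ≤ 1)) ||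
  (f.length == s.length + 1 && g f s) || (s.length == f.length + 1 && g s f)

-- hd 1: the pairs A's one_change accepts; hd 0: true edit distance at most 1
def hd (b : Nat) : List Char → List Char → Bool
  | x :: f, y :: s =>
    (if x == y then hd b f s else f == s) ||
    f.drop b == (y :: s).drop b || s.drop b == (x :: f).drop b
  | f, s => f.drop 1 == [] && s.drop 1 == []

def pvNear (b : Nat) (tok_ings : List String) : Bool :=
  tok_ings.any fun t => ["chili".toList, "chilies".toList].any (hd b (PySem.Chars.lower t.toList))


theorem takeEq (f s : List Char) (j : Nat) :
    f.take j = s.take j ↔ ∀ k, k < j → f[k]? = s[k]? := by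
  constructor
  · intro h k hk
    have := congrArg (fun l => l[k]?) h
    simpa [List.getElem?_take, hk] using this
  · intro h
    apply List.ext_getElem?
    intro k
    by_cases hk : k < j
    · simp [List.getElem?_take, hk, h k hk]
    · simp [List.getElem?_take, hk]

theorem dropEq (f s : List Char) (a b : Nat) :
    f.drop a = s.drop b ↔ ∀ k, f[a + k]? = s[b + k]? := by
  constructor
  · intro h k
    have := congrArg (fun l => l[k]?) h
    simpa [List.getElem?_drop] using this
  · intro h
    apply List.ext_getElem?
    intro k
    simpa [List.getElem?_drop] using h k

theorem eqLoop_iff (ps : List (Char × Char)) : ∀ count, count ≤ 1 →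
    (eqLoop ps count = true ↔ count + ps.countP (fun p => p.1 != p.2) ≤ 1) := by
  induction ps with
  | nil =>
    intro count h
    simp [eqLoop]
    omega
  | cons p rest ih =>
    intro count h
    obtain ⟨a, b⟩ := p
    by_cases hab : a = b
    · subst hab
      simp [eqLoop, List.countP_cons, ih count h]
    · interval_cases count
      · simp [eqLoop, hab, List.countP_cons, ih 1 (by omega)]
      · simp [eqLoop, hab, List.countP_cons]

theorem gapLoop_one_iff (f : List Char) : ∀ (rest : List Char) (i : Nat),
    (gapLoop f rest i 1 = true ↔ ∀ k, k < rest.length → f[i + 1 + k]? = rest[k]?) := by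
  intro rest
  induction rest with
  | nil => intro i; simp [gapLoop]
  | cons c rest ih =>
    intro i
    by_cases h : f[i + 1]? = some c
    · simp only [gapLoop, h, ne_eq, not_true_eq_false, if_false, ite_false]
      rw [ih (i + 1)]
      constructor
      · intro ht k hk
        cases k with
        | zero => simpa using h
        | succ k =>
          have e : i + 1 + (k + 1) = i + 1 + 1 + k := by omega
          rw [e]
          simpa using ht k (by simpa using hk)
      · intro ht k hk
        have e : i + 1 + 1 + k = i + 1 + (k + 1) := by omega
        rw [e]
        simpa using ht (k + 1) (by simp; omega)
    · simp only [gapLoop, h, ne_eq, not_false_eq_true, if_true, ite_true, Nat.reduceAdd,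
        gt_iff_lt, Nat.one_lt_two, if_pos, show (1 + 1 > 1) = True by simp]
      constructor
      · intro hf; exact absurd hf (by simp)
      · intro ht
        exact absurd (by simpa using ht 0 (by simp)) h

theorem gapLoop_zero_iff (f : List Char) : ∀ (rest : List Char) (i : Nat),
    (gapLoop f rest i 0 = true ↔
      (∀ k, k < rest.length → f[i + k]? = rest[k]?) ∨
      ∃ j, j < rest.length ∧ (∀ k, k < j → f[i + k]? = rest[k]?) ∧ f[i + j]? ≠ rest[j]? ∧
        (∀ k, k < rest.length → j < k → f[i + k + 1]? = rest[k]?)) := by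
  intro rest
  induction rest with
  | nil => intro i; simp [gapLoop]
  | cons c rest ih =>
    intro i
    by_cases h : f[i + 0]? = some c
    · simp only [gapLoop, h, ne_eq, not_true_eq_false, ite_false, if_false]
      rw [ih (i + 1)]
      constructor
      · rintro (h1 | ⟨j, hj, hp, hne, ht⟩)
        · left
          intro k hk
          cases k with
          | zero => simpa using h
          | succ k =>
            have e : i + (k + 1) = i + 1 + k := by omega
            rw [e]
            simpa using h1 k (by simpa using hk)
        · right
          refine ⟨j + 1, by simpa using hj, ?_, ?_, ?_⟩
          · intro k hk
            cases k with
            | zero => simpa using h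
            | succ k =>
              have e : i + (k + 1) = i + 1 + k := by omega
              rw [e]
              simpa using hp k (by omega)
          · have e : i + (j + 1) = i + 1 + j := by omega
            rw [e]
            simpa using hne
          · intro k hk hjk
            cases k with
            | zero => omega
            | succ k =>
              have e : i + (k + 1) + 1 = i + 1 + k + 1 := by omega
              rw [e]
              simpa using ht k (by simpa using hk) (by omega)
      · rintro (h1 | ⟨j, hj, hp, hne, ht⟩)
        · left
          intro k hk
          have e : i + 1 + k = i + (k + 1) := by omega
          rw [e]
          simpa using h1 (k + 1) (by simp; omega)
        · cases j with
          | zero => exact absurd (by simpa using h) (by simpa using hne)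
          | succ j =>
            right
            refine ⟨j, by simpa using hj, ?_, ?_, ?_⟩
            · intro k hk
              have e : i + 1 + k = i + (k + 1) := by omega
              rw [e]
              simpa using hp (k + 1) (by omega)
            · have e : i + 1 + j = i + (j + 1) := by omega
              rw [e]
              simpa using hne
            · intro k hk hjk
              have e : i + 1 + k + 1 = i + (k + 1) + 1 := by omega
              rw [e]
              simpa using ht (k + 1) (by simp; omega) (by omega)
    · simp only [gapLoop, h, ne_eq, not_false_eq_true, ite_true, if_true,
        show (0 + 1 > 1) = False by simp, if_false, ite_false]
      rw [gapLoop_one_iff f rest (i + 1)]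
      constructor
      · intro ht
        right
        refine ⟨0, by simp, by omega, by simpa using h, ?_⟩
        intro k hk hk0
        cases k with
        | zero => omega
        | succ k =>
          have e : i + (k + 1) + 1 = i + 1 + 1 + k := by omega
          rw [e]
          simpa using ht k (by simpa using hk)
      · rintro (h1 | ⟨j, hj, hp, hne, ht⟩)
        · exact absurd (by simpa using h1 0 (by simp)) h
        · cases j with
          | succ j => exact absurd (by simpa using hp 0 (by omega)) h
          | zero =>
            intro k hk
            have e : i + 1 + 1 + k = i + (k + 1) + 1 := by omega
            rw [e]
            simpa using ht (k + 1) (by simp; omega) (by omega)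

theorem gapLoop_eq_gapFun (f s : List Char) (h : f.length = s.length + 1) :
    gapLoop f s 0 0 = gapFun f s := by
  rw [Bool.eq_iff_iff, gapLoop_zero_iff f s 0]
  simp only [gapFun, List.any_eq_true, List.mem_range, Bool.and_eq_true, beq_iff_eq,
    Nat.lt_succ_iff, takeEq, dropEq]
  constructor
  · rintro (hall | ⟨j, hj, hp, hne, ht⟩)
    · refine ⟨s.length, le_refl _, fun k hk => by simpa using hall k hk, fun k => ?_⟩
      rw [List.getElem?_eq_none (by omega : f.length ≤ s.length + 2 + k),
        List.getElem?_eq_none (by omega : s.length ≤ s.length + 1 + k)]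
    · refine ⟨j, by omega, fun k hk => by simpa using hp k hk, fun k => ?_⟩
      by_cases hk : j + 1 + k < s.length
      · have := ht (j + 1 + k) hk (by omega)
        have e : 0 + (j + 1 + k) + 1 = j + 2 + k := by omega
        rw [e] at this
        simpa using this
      · rw [List.getElem?_eq_none (by omega : f.length ≤ j + 2 + k),
          List.getElem?_eq_none (by omega : s.length ≤ j + 1 + k)]
  · rintro ⟨j, hj, hp, ht⟩
    by_cases hall : ∀ k, k < s.length → f[k]? = s[k]?
    · exact Or.inl fun k hk => by simpa using hall k hk
    · push_neg at hall
      obtain ⟨k0, hk0, hne0⟩ := hall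
      have hex : ∃ m, f[m]? ≠ s[m]? := ⟨k0, hne0⟩
      right
      refine ⟨Nat.find hex, ?_, ?_, ?_, ?_⟩
      · have := Nat.find_min' hex hne0
        omega
      · intro k hk
        have := Nat.find_min hex hk
        simpa using not_not.mp this
      · simpa using Nat.find_spec hex
      · intro k hk hjk
        -- k > find ≥ j, so k = j + 1 + t
        have hjle : j ≤ Nat.find hex := by
          by_contra hlt
          exact (Nat.find_spec hex) (hp (Nat.find hex) (by omega))
        obtain ⟨t, rfl⟩ : ∃ t, k = j + 1 + t := ⟨k - j - 1, by omega⟩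
        have := ht t
        have e : j + 2 + t = j + 1 + t + 1 := by omega
        rw [e] at this
        simpa using this

theorem zip_self_countP (f : List Char) :
    ((f.zip f).countP fun p => p.1 != p.2) = 0 := by
  induction f with
  | nil => simp
  | cons a f ih => simp [List.countP_cons, ih]

theorem nat_beq_true {a b : Nat} (h : a = b) : (a == b) = true := by simpa using h
theorem nat_beq_false {a b : Nat} (h : a ≠ b) : (a == b) = false := by simpa using h

theorem oneChange_eq (f s : List Char) : oneChange f s =
    ((f.length == s.length && decide (((f.zip s).countP fun p => p.1 != p.2) ≤ 1)) ||
     (f.length == s.length + 1 && gapFun f s) || (s.length == f.length + 1 && gapFun s f)) := by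
  by_cases hfs : f = s
  · subst hfs
    have e2 : (f.length == f.length + 1) = false := nat_beq_false (by omega)
    simp [oneChange, e2, zip_self_countP]
  · by_cases hlen : f.length = s.length
    · have e1 : (f.length == s.length) = true := nat_beq_true hlen
      have e2 : (f.length == s.length + 1) = false := nat_beq_false (by omega)
      have e3 : (s.length == f.length + 1) = false := nat_beq_false (by omega)
      rw [Bool.eq_iff_iff]
      simp only [oneChange, e1, e2, e3, if_neg hfs, if_pos hlen, Bool.true_and,
        Bool.false_and, Bool.or_false, Bool.false_or]
      rw [eqLoop_iff (f.zip s) 0 (by omega)]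
      simp
    · by_cases hgt : s.length > f.length
      · by_cases h1 : s.length = f.length + 1
        · have e1 : (f.length == s.length) = false := nat_beq_false hlen
          have e2 : (f.length == s.length + 1) = false := nat_beq_false (by omega)
          have e3 : (s.length == f.length + 1) = true := nat_beq_true h1
          simp only [oneChange, e1, e2, e3, if_neg hfs, if_neg hlen, if_pos hgt,
            if_pos h1, Bool.true_and, Bool.false_and, Bool.or_false, Bool.false_or]
          exact gapLoop_eq_gapFun s f h1
        · have e1 : (f.length == s.length) = false := nat_beq_false hlen
          have e2 : (f.length == s.length + 1) = false := nat_beq_false (by omega)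
          have e3 : (s.length == f.length + 1) = false := nat_beq_false h1
          simp only [oneChange, e1, e2, e3, if_neg hfs, if_neg hlen, if_pos hgt,
            if_neg h1, Bool.false_and, Bool.or_false, Bool.false_or]
      · by_cases h2 : f.length = s.length + 1
        · have e1 : (f.length == s.length) = false := nat_beq_false hlen
          have e2 : (f.length == s.length + 1) = true := nat_beq_true h2
          have e3 : (s.length == f.length + 1) = false := nat_beq_false (by omega)
          simp only [oneChange, e1, e2, e3, if_neg hfs, if_neg hlen, if_neg hgt,
            if_pos h2, Bool.true_and, Bool.false_and, Bool.or_false, Bool.false_or]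
          exact gapLoop_eq_gapFun f s h2
        · have e1 : (f.length == s.length) = false := nat_beq_false hlen
          have e2 : (f.length == s.length + 1) = false := nat_beq_false h2
          have e3 : (s.length == f.length + 1) = false := nat_beq_false (by omega)
          simp only [oneChange, e1, e2, e3, if_neg hfs, if_neg hlen, if_neg hgt,
            if_neg h2, Bool.false_and, Bool.or_false, Bool.false_or]

theorem any_range_succ (n : Nat) (p : Nat → Bool) :
    (List.range (n + 1)).any p = (p 0 || (List.range n).any fun j => p (j + 1)) := by
  simp [List.range_succ_eq_map, Function.comp_def]

theorem zipcount_zero (f s : List Char) (h : f.length = s.length) :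
    (((f.zip s).countP fun p => p.1 != p.2) = 0) ↔ f = s := by
  induction f generalizing s with
  | nil => cases s with | nil => simp | cons y s => simp at h
  | cons x f ih =>
    cases s with
    | nil => simp at h
    | cons y s =>
      have h' : f.length = s.length := by simpa using h
      by_cases hxy : x = y
      · simp [List.countP_cons, hxy, ih s h']
      · simp [List.countP_cons, hxy]

theorem gapFun_cons (x y : Char) (f s : List Char) :
    gapFun (x :: f) (y :: s) = ((f.drop 1 == (y :: s).drop 1) || (x == y && gapFun f s)) := by
  simp only [gapFun, List.length_cons, any_range_succ, List.take_zero, BEq.rfl, Bool.true_and,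
    Nat.zero_add, List.drop_succ_cons, List.take_succ_cons, List.cons_beq_cons]
  cases hxy : x == y
  · simp
  · simp [Bool.and_assoc]

theorem delFun_cons (x y : Char) (f s : List Char) :
    delFun (x :: f) (y :: s) = ((f.drop 0 == (y :: s).drop 0) || (x == y && delFun f s)) := by
  simp only [delFun, List.length_cons, any_range_succ, List.eraseIdx_cons_zero,
    List.eraseIdx_cons_succ, List.cons_beq_cons, List.drop_zero]
  cases hxy : x == y
  · simp
  · simp

theorem hd_eq_guarded (b : Nat) (hb : b = 0 ∨ b = 1) (g : List Char → List Char → Bool)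
    (hnil : ∀ c, g [c] [] = true)
    (hcons : ∀ x f y s, g (x :: f) (y :: s) =
      ((f.drop b == (y :: s).drop b) || (x == y && g f s))) :
    ∀ f s, hd b f s = guarded g f s := by
  have key : ∀ (u w : List Char) (c : Char), u.drop b = (c :: w).drop b →
      u.length ≠ w.length + 1 → u = [] ∧ w = [] := by
    intro u w c h hn
    have hl := congrArg List.length h
    simp only [List.length_drop, List.length_cons] at hl
    rcases hb with rfl | rfl
    · simp only [Nat.sub_zero] at hl; omega
    · have : u.length = 0 ∧ w.length = 0 := by omega
      exact ⟨List.length_eq_zero_iff.mp this.1, List.length_eq_zero_iff.mp this.2⟩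
  intro f
  induction f with
  | nil =>
    intro s
    cases s with
    | nil => simp [hd, guarded]
    | cons y s =>
      cases s with
      | nil => simp [hd, guarded, hnil]
      | cons z s => simp [hd, guarded]
  | cons x f ih =>
    intro s
    cases s with
    | nil =>
      cases f with
      | nil => simp [hd, guarded, hnil]
      | cons z f => simp [hd, guarded]
    | cons y s =>
      rw [Bool.eq_iff_iff]
      by_cases hxy : x = y
      · simp only [hd, hcons, ih, guarded, List.zip_cons_cons, List.countP_cons, hxy,
          List.length_cons, bne_self_eq_false, Bool.false_eq_true, if_false, if_true,
          BEq.rfl, Bool.true_and, Bool.or_eq_true, Bool.and_eq_true, beq_iff_eq,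
          decide_eq_true_iff, Nat.add_zero]
        constructor
        · rintro ((((hA | hB) | hC) | hD) | hD)
          · exact Or.inl (Or.inl ⟨by omega, hA.2⟩)
          · exact Or.inl (Or.inr ⟨by omega, Or.inr hB.2⟩)
          · exact Or.inr ⟨by omega, Or.inr hC.2⟩
          · by_cases hl : f.length = s.length + 1
            · exact Or.inl (Or.inr ⟨by omega, Or.inl hD⟩)
            · obtain ⟨hf, hs⟩ := key f s y hD hl
              subst hf; subst hs
              exact Or.inl (Or.inl ⟨rfl, by simp⟩)
          · by_cases hl : s.length = f.length + 1
            · exact Or.inr ⟨by omega, Or.inl hD⟩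
            · obtain ⟨hs, hf⟩ := key s f y hD hl
              subst hf; subst hs
              exact Or.inl (Or.inl ⟨rfl, by simp⟩)
        · rintro ((⟨h1, h2⟩ | ⟨h1, hD | hg⟩) | ⟨h1, hD | hg⟩)
          · exact Or.inl (Or.inl (Or.inl (Or.inl ⟨by omega, h2⟩)))
          · exact Or.inl (Or.inr hD)
          · exact Or.inl (Or.inl (Or.inl (Or.inr ⟨by omega, hg⟩)))
          · exact Or.inr hD
          · exact Or.inl (Or.inl (Or.inr ⟨by omega, hg⟩))
      · simp only [hd, hcons, guarded, List.zip_cons_cons, List.countP_cons,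
          List.length_cons, Bool.or_eq_true, Bool.and_eq_true, beq_iff_eq,
          decide_eq_true_iff, hxy, if_false, bne_iff_ne, ne_eq, not_false_eq_true,
          if_true]
        constructor
        · rintro ((h | hD) | hD)
          · subst h
            exact Or.inl (Or.inl ⟨rfl, by simp [zip_self_countP]⟩)
          · by_cases hl : f.length = s.length + 1
            · exact Or.inl (Or.inr ⟨by omega, Or.inl hD⟩)
            · obtain ⟨hf, hs⟩ := key f s y hD hl
              subst hf; subst hs
              exact Or.inl (Or.inl ⟨rfl, by simp⟩)
          · by_cases hl : s.length = f.length + 1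
            · exact Or.inr ⟨by omega, Or.inl hD⟩
            · obtain ⟨hs, hf⟩ := key s f x hD hl
              subst hf; subst hs
              exact Or.inl (Or.inl ⟨rfl, by simp⟩)
        · rintro ((⟨h1, h2⟩ | ⟨h1, hD | ⟨hfalse, _⟩⟩) | ⟨h1, hD | ⟨hyx, _⟩⟩)
          · have hz : ((f.zip s).countP fun p => p.1 != p.2) = 0 := by omega
            exact Or.inl (Or.inl ((zipcount_zero f s (by omega)).mp hz))
          · exact Or.inl (Or.inr hD)
          · exact hfalse.elim
          · exact Or.inr hD
          · exact absurd hyx.symm hxy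

theorem oneChange_hd (f s : List Char) : oneChange f s = hd 1 f s := by
  rw [oneChange_eq, hd_eq_guarded 1 (Or.inr rfl) gapFun
    (fun c => by simp [gapFun])
    (fun x f y s => by simpa using gapFun_cons x y f s)]
  rfl

def mLev : List Char → List Char → Int
  | f, [] => f.length
  | [], s => s.length
  | x :: f, y :: s =>
    min (min (mLev f s + if x = y then 0 else 1) (mLev f (y :: s) + 1)) (mLev (x :: f) s + 1)
termination_by f s => f.length + s.length
decreasing_by all_goals (simp only [List.length_cons]; omega)

theorem mLev_nonneg (f s : List Char) : 0 ≤ mLev f s := by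
  fun_induction mLev f s with
  | case1 f => simp [mLev]
  | case2 s => simp [mLev]
  | case3 x f y s ih1 ih2 ih3 =>
    simp only [mLev, le_min_iff]
    refine ⟨⟨?_, by omega⟩, by omega⟩
    split_ifs <;> omega

theorem mLev_zero (f s : List Char) : mLev f s = 0 ↔ f = s := by
  fun_induction mLev f s with
  | case1 f => cases f <;> simp [mLev] <;> omega
  | case2 s => cases s <;> simp [mLev] <;> omega
  | case3 x f y s ih1 ih2 ih3 =>
    have n1 := mLev_nonneg f s
    have n2 := mLev_nonneg f (y :: s)
    have n3 := mLev_nonneg (x :: f) s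
    by_cases hxy : x = y
    · subst hxy
      rw [if_pos rfl]
      simp only [add_zero, List.cons.injEq, eq_self_iff_true, true_and]
      rw [← ih1]
      omega
    · rw [if_neg hxy]
      simp only [List.cons.injEq]
      constructor
      · intro h; omega
      · rintro ⟨h, _⟩; exact absurd h hxy

theorem mLev_le_one (f s : List Char) : mLev f s ≤ 1 ↔ hd 0 f s = true := by
  fun_induction mLev f s with
  | case1 f =>
    match f with
    | [] => simp [mLev, hd]
    | [x] => simp [mLev, hd]
    | x :: y :: f => simp [mLev, hd]
  | case2 s =>
    match s with
    | y :: s => cases s <;> simp [mLev, hd]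
  | case3 x f y s ih1 ih2 ih3 =>
    have n1 := mLev_nonneg f s
    have n2 := mLev_nonneg f (y :: s)
    have n3 := mLev_nonneg (x :: f) s
    have e2 : mLev f (y :: s) + 1 ≤ 1 ↔ f = y :: s := by rw [← mLev_zero]; omega
    have e3 : mLev (x :: f) s + 1 ≤ 1 ↔ x :: f = s := by rw [← mLev_zero]; omega
    rw [min_le_iff, min_le_iff]
    by_cases hxy : x = y
    · subst hxy
      rw [if_pos rfl, add_zero, ih1, e2, e3]
      simp only [hd, BEq.rfl, if_true, List.drop_zero, Bool.or_eq_true, beq_iff_eq]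
      constructor
      · rintro ((h | h) | h)
        · exact Or.inl (Or.inl h)
        · exact Or.inl (Or.inr h)
        · exact Or.inr h.symm
      · rintro ((h | h) | h)
        · exact Or.inl (Or.inl h)
        · exact Or.inl (Or.inr h)
        · exact Or.inr h.symm
    · have e1 : mLev f s + (if x = y then (0 : Int) else 1) ≤ 1 ↔ f = s := by
        rw [if_neg hxy, ← mLev_zero]; omega
      rw [e1, e2, e3]
      have hb : (x == y) = false := by simpa using hxy
      simp only [hd, hb, if_false, List.drop_zero, Bool.or_eq_true, beq_iff_eq,
        Bool.false_eq_true]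
      constructor
      · rintro ((h | h) | h)
        · exact Or.inl (Or.inl h)
        · exact Or.inl (Or.inr h)
        · exact Or.inr h.symm
      · rintro ((h | h) | h)
        · exact Or.inl (Or.inl h)
        · exact Or.inl (Or.inr h)
        · exact Or.inr h.symm

theorem mLev_nil (v : List Char) : mLev [] v = v.length := by
  cases v <;> simp [mLev]

theorem tails_map_headD (g : List Char → Int) (bs : List Char) :
    ((bs.tails.map g).headD 0) = g bs := by
  cases bs <;> simp

theorem row0_spec (b : List Char) :
    (List.range (b.length + 1)).map (fun j => ((b.length - j : Nat) : Int)) =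
      b.tails.map (fun v => mLev [] v) := by
  induction b with
  | nil => simp [mLev]
  | cons y b ih =>
    have h1 : (List.range (b.length + 1 + 1)).map (fun j => (((b.length + 1) - j : Nat) : Int)) =
        ((b.length + 1 : Nat) : Int) ::
          (List.range (b.length + 1)).map (fun j => ((b.length - j : Nat) : Int)) := by
      rw [List.range_succ_eq_map]
      simp only [List.map_cons, List.map_map, Nat.sub_zero]
      refine congrArg₂ List.cons rfl ?_
      apply List.map_congr_left
      intro j hj
      simp [Function.comp_def, Nat.succ_sub_succ]
    simp only [List.length_cons, h1, ih, List.tails_cons, List.map_cons, mLev_nil]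

theorem newRow_spec (x : Char) (bs as_ : List Char) :
    newRow x bs (bs.tails.map (fun v => mLev as_ v)) =
      bs.tails.map (fun v => mLev (x :: as_) v) := by
  induction bs with
  | nil =>
    show newRow x [] ([[]].map fun v => mLev as_ v) = [[]].map fun v => mLev (x :: as_) v
    simp only [List.map_cons, List.map_nil, newRow, List.headD_cons]
    rw [show mLev as_ [] = (as_.length : Int) from by simp [mLev],
      show mLev (x :: as_) [] = ((x :: as_).length : Int) from by simp [mLev]]
    simp only [List.length_cons, List.cons.injEq, and_true]
    push_cast
    ring
  | cons y bs ih =>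
    simp only [List.tails_cons, List.map_cons, newRow, ih, tails_map_headD]
    simp only [mLev]

theorem lev_eq (a b : List Char) : lev a b = mLev a b := by
  have key : a.foldr (fun x row => newRow x b row) ((List.range (b.length + 1)).map
      (fun j => ((b.length - j : Nat) : Int))) = b.tails.map (fun v => mLev a v) := by
    induction a with
    | nil => simpa using row0_spec b
    | cons x a ih => simp only [List.foldr_cons, ih, newRow_spec]
  simp only [lev, key, tails_map_headD]

theorem lev_hd (f s : List Char) : decide (lev f s ≤ 1) = hd 0 f s := by
  rw [Bool.eq_iff_iff, decide_eq_true_iff, lev_eq, mLev_le_one]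

theorem hasChili_eq (l : List String) : has_chili l = pvNear 1 l := by
  induction l with
  | nil => rfl
  | cons tok rest ih =>
    simp only [has_chili, oneChange_hd, ih, pvNear, List.any_cons, List.any_nil,
      Bool.or_false]
    cases hx : (hd 1 (PySem.Chars.lower tok.toList) "chili".toList ||
        hd 1 (PySem.Chars.lower tok.toList) "chilies".toList) <;> simp_all

theorem hd0_len_far (f w : List Char) (h : ¬ ((f.length : Int) - (w.length : Int)).natAbs ≤ 1) :
    hd 0 f w = false := by
  rw [hd_eq_guarded 0 (Or.inl rfl) delFun (fun x => by simp [delFun])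
      (fun x f y s => by simpa using delFun_cons x y f s)]
  have e1 : (f.length == w.length) = false := nat_beq_false (by omega)
  have e2 : (f.length == w.length + 1) = false := nat_beq_false (by omega)
  have e3 : (w.length == f.length + 1) = false := nat_beq_false (by omega)
  simp [guarded, e1, e2, e3]

theorem near_pair (f w : List Char) :
    (decide (((f.length : Int) - (w.length : Int)).natAbs ≤ 1) && decide (lev f w ≤ 1)) =
      hd 0 f w := by
  by_cases hb : ((f.length : Int) - (w.length : Int)).natAbs ≤ 1
  · simp only [hb, decide_true, Bool.true_and]
    exact lev_hd f w
  · simp only [hb, decide_false, Bool.false_and]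
    exact (hd0_len_far f w hb).symm

theorem hasChiliAlt_eq (l : List String) : has_chili_alt l = pvNear 0 l := by
  simp only [has_chili_alt, nearB, pvNear, near_pair]

theorem del_le_gap (f s : List Char) (h : f.length = s.length + 1) :
    delFun f s = true → gapFun f s = true := by
  simp only [delFun, gapFun, List.any_eq_true, List.mem_range, Bool.and_eq_true, beq_iff_eq,
    Nat.lt_succ_iff, takeEq, dropEq]
  rintro ⟨j, hj, he⟩
  refine ⟨j, by omega, fun k hk => ?_, fun k => ?_⟩
  · have := congrArg (fun l => l[k]?) he
    simpa [List.getElem?_eraseIdx, hk] using this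
  · have := congrArg (fun l => l[j + 1 + k]?) he
    have hkj : ¬ j + 1 + k < j := by omega
    have e : j + 1 + k + 1 = j + 2 + k := by omega
    simpa [List.getElem?_eraseIdx, hkj, e] using this

theorem hd_mono (f s : List Char) : hd 0 f s = true → hd 1 f s = true := by
  rw [hd_eq_guarded 0 (Or.inl rfl) delFun (fun c => by simp [delFun])
      (fun x f y s => by simpa using delFun_cons x y f s),
    hd_eq_guarded 1 (Or.inr rfl) gapFun (fun c => by simp [gapFun])
      (fun x f y s => by simpa using gapFun_cons x y f s)]
  simp only [guarded, Bool.or_eq_true, Bool.and_eq_true, beq_iff_eq]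
  rintro ((h | ⟨h1, h2⟩) | ⟨h1, h2⟩)
  · exact Or.inl (Or.inl h)
  · exact Or.inl (Or.inr ⟨h1, del_le_gap _ _ h1 h2⟩)
  · exact Or.inr ⟨h1, del_le_gap _ _ h1 h2⟩

theorem pvNear_mono (l : List String) : pvNear 0 l = true → pvNear 1 l = true := by
  simp only [pvNear, List.any_eq_true, List.mem_cons, List.not_mem_nil, or_false]
  rintro ⟨t, ht, c, hcm, h⟩
  exact ⟨t, ht, c, hcm, hd_mono _ _ h⟩

theorem er2_getElem? (f : List Char) (j k : Nat) :
    ((f.eraseIdx j).eraseIdx j)[k]? = if k < j then f[k]? else f[k + 2]? := by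
  by_cases hk : k < j
  · simp [List.getElem?_eraseIdx, hk]
  · have h2 : ¬ k + 1 < j := by omega
    simp [List.getElem?_eraseIdx, hk, h2]

theorem er2_iff (f s : List Char) (j : Nat) (hj : j ≤ s.length) (hl : f.length = s.length + 1) :
    (f.eraseIdx j).eraseIdx j = s.eraseIdx j ↔
      (∀ k, k < j → f[k]? = s[k]?) ∧ (∀ k, f[j + 2 + k]? = s[j + 1 + k]?) := by
  constructor
  · intro h
    have hpt : ∀ i, (if i < j then f[i]? else f[i + 2]?) = (if i < j then s[i]? else s[i + 1]?) := by
      intro i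
      have := congrArg (fun l => l[i]?) h
      simp only [er2_getElem?] at this
      simpa only [List.getElem?_eraseIdx] using this
    constructor
    · intro k hk
      have := hpt k
      rwa [if_pos hk, if_pos hk] at this
    · intro k
      have := hpt (j + k)
      have h1 : ¬ j + k < j := by omega
      rw [if_neg h1, if_neg h1] at this
      have e1 : j + k + 2 = j + 2 + k := by omega
      have e2 : j + k + 1 = j + 1 + k := by omega
      rw [e1, e2] at this
      exact this
  · rintro ⟨hp, hs⟩
    apply List.ext_getElem?
    intro k
    rw [er2_getElem?, List.getElem?_eraseIdx]
    by_cases hk : k < j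
    · simp [hk, hp k hk]
    · rw [if_neg hk, if_neg hk]
      have e1 : k + 2 = j + 2 + (k - j) := by omega
      have e2 : k + 1 = j + 1 + (k - j) := by omega
      rw [e1, e2]
      exact hs (k - j)

theorem gapAcc_gapFun (f s : List Char) : gapAcc f s ↔ (f.length = s.length + 1 ∧ gapFun f s = true) := by
  unfold gapAcc
  constructor
  · rintro ⟨hl, j, hj, he⟩
    refine ⟨hl, ?_⟩
    simp only [gapFun, List.any_eq_true, List.mem_range, Bool.and_eq_true, beq_iff_eq,
      Nat.lt_succ_iff, takeEq, dropEq]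
    obtain ⟨hp, hs⟩ := (er2_iff f s j hj hl).mp he
    exact ⟨j, hj, hp, hs⟩
  · rintro ⟨hl, hg⟩
    refine ⟨hl, ?_⟩
    simp only [gapFun, List.any_eq_true, List.mem_range, Bool.and_eq_true, beq_iff_eq,
      Nat.lt_succ_iff, takeEq, dropEq] at hg
    obtain ⟨j, hj, hp, hs⟩ := hg
    exact ⟨j, hj, (er2_iff f s j hj hl).mpr ⟨hp, hs⟩⟩

theorem cpCons (a b : Char) (l : List (Char × Char)) :
    ((a, b) :: l).countP (fun p => p.1 != p.2) =
      l.countP (fun p => p.1 != p.2) + if a = b then 0 else 1 := by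
  rw [List.countP_cons]
  by_cases hab : a = b <;> simp [hab]

theorem one_mismatch (f : List Char) : ∀ (s : List Char) (k : Nat), f.length = s.length →
    k < s.length → f[k]? ≠ s[k]? → 1 ≤ (f.zip s).countP (fun p => p.1 != p.2) := by
  induction f with
  | nil => intro s k h hk _; simp at h; omega
  | cons x f ih =>
    intro s k h hk hne
    cases s with
    | nil => simp at hk
    | cons y s =>
      rw [List.zip_cons_cons, cpCons]
      cases k with
      | zero =>
        have h1 : x ≠ y := by simpa using hne
        rw [if_neg h1]
        omega
      | succ k =>
        have := ih s k (by simpa using h) (by simpa using hk) (by simpa using hne)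
        split_ifs <;> omega

theorem two_mismatch (f : List Char) : ∀ (s : List Char) (m k : Nat), f.length = s.length →
    m < k → k < s.length → f[m]? ≠ s[m]? → f[k]? ≠ s[k]? →
    2 ≤ (f.zip s).countP (fun p => p.1 != p.2) := by
  induction f with
  | nil => intro s m k h _ hk _ _; simp at h; omega
  | cons x f ih =>
    intro s m k h hmk hk hm hkne
    cases s with
    | nil => simp at hk
    | cons y s =>
      rw [List.zip_cons_cons, cpCons]
      cases m with
      | zero =>
        obtain ⟨k', rfl⟩ : ∃ k', k = k' + 1 := ⟨k - 1, by omega⟩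
        have h1 : x ≠ y := by simpa using hm
        rw [if_neg h1]
        have h2 := one_mismatch f s k' (by simpa using h) (by simpa using hk)
          (by simpa using hkne)
        omega
      | succ m =>
        obtain ⟨k', rfl⟩ : ∃ k', k = k' + 1 := ⟨k - 1, by omega⟩
        have := ih s m k' (by simpa using h) (by omega) (by simpa using hk)
          (by simpa using hm) (by simpa using hkne)
        split_ifs <;> omega

theorem agree_le_one (f : List Char) : ∀ (s : List Char) (j : Nat), f.length = s.length →
    (∀ k, k ≠ j → f[k]? = s[k]?) → (f.zip s).countP (fun p => p.1 != p.2) ≤ 1 := by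
  induction f with
  | nil => intro s j h _; simp
  | cons x f ih =>
    intro s j h hag
    cases s with
    | nil => simp at h
    | cons y s =>
      rw [List.zip_cons_cons, cpCons]
      cases j with
      | zero =>
        have : f = s := by
          apply List.ext_getElem?
          intro k
          simpa using hag (k + 1) (by omega)
        subst this
        rw [zip_self_countP]
        split_ifs <;> omega
      | succ j =>
        have h0 : x = y := by simpa using hag 0 (by omega)
        rw [if_pos h0]
        have := ih s j (by simpa using h) (fun k hk => by simpa using hag (k + 1) (by omega))
        omega

theorem ham_iff (f s : List Char) (h : f.length = s.length) :
    (f.zip s).countP (fun p => p.1 != p.2) ≤ 1 ↔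
      f = s ∨ ∃ j < s.length, f.eraseIdx j = s.eraseIdx j := by
  constructor
  · intro hc
    by_cases hall : ∀ k : Nat, f[k]? = s[k]?
    · exact Or.inl (List.ext_getElem? hall)
    · push_neg at hall
      obtain ⟨m, hm⟩ := hall
      have hmlt : m < s.length := by
        by_contra hge
        exact hm (by rw [List.getElem?_eq_none (by omega : f.length ≤ m),
          List.getElem?_eq_none (by omega : s.length ≤ m)])
      refine Or.inr ⟨m, hmlt, ?_⟩
      have hag : ∀ k, k ≠ m → f[k]? = s[k]? := by
        intro k hk
        by_contra hkne
        by_cases hklt : k < s.length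
        · rcases Nat.lt_or_ge m k with h' | h'
          · have := two_mismatch f s m k h h' hklt hm hkne
            omega
          · have := two_mismatch f s k m h (by omega) hmlt hkne hm
            omega
        · exact hkne (by rw [List.getElem?_eq_none (by omega : f.length ≤ k),
            List.getElem?_eq_none (by omega : s.length ≤ k)])
      apply List.ext_getElem?
      intro k
      rw [List.getElem?_eraseIdx, List.getElem?_eraseIdx]
      by_cases hk : k < m
      · simp [hk, hag k (by omega)]
      · rw [if_neg hk, if_neg hk]
        exact hag (k + 1) (by omega)
  · rintro (rfl | ⟨j, hj, he⟩)
    · simp [zip_self_countP]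
    · refine agree_le_one f s j h ?_
      intro k hk
      by_cases hklt : k < j
      · have := congrArg (fun l => l[k]?) he
        simpa [List.getElem?_eraseIdx, hklt] using this
      · have h1 : ¬ k - 1 < j := by omega
        have := congrArg (fun l => l[k - 1]?) he
        simp only at this
        rw [List.getElem?_eraseIdx, List.getElem?_eraseIdx, if_neg h1, if_neg h1] at this
        have e : k - 1 + 1 = k := by omega
        rwa [e] at this

theorem eraseIdx_of_ge {l : List Char} {j : Nat} (h : l.length ≤ j) : l.eraseIdx j = l :=
  List.eraseIdx_of_length_le h

theorem closeTo_hd0 (f s : List Char) : closeTo f s ↔ hd 0 f s = true := by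
  rw [hd_eq_guarded 0 (Or.inl rfl) delFun (fun x => by simp [delFun])
      (fun x f y s => by simpa using delFun_cons x y f s)]
  simp only [guarded, delFun, Bool.or_eq_true, Bool.and_eq_true, beq_iff_eq,
    decide_eq_true_eq, List.any_eq_true, List.mem_range]
  unfold closeTo
  constructor
  · rintro (rfl | ⟨j, hj, he | he | he⟩)
    · exact Or.inl (Or.inl ⟨rfl, by simp [zip_self_countP]⟩)
    · by_cases hjf : j < f.length
      · have hl := congrArg List.length he
        simp only [List.length_eraseIdx, hjf, if_pos] at hl
        exact Or.inl (Or.inr ⟨by omega, j, hjf, he⟩)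
      · rw [eraseIdx_of_ge (by omega)] at he
        subst he
        exact Or.inl (Or.inl ⟨rfl, by simp [zip_self_countP]⟩)
    · by_cases hjs : j < s.length
      · have hl := congrArg List.length he
        simp only [List.length_eraseIdx, hjs, if_pos] at hl
        exact Or.inr ⟨by omega, j, hjs, he⟩
      · rw [eraseIdx_of_ge (by omega)] at he
        subst he
        exact Or.inl (Or.inl ⟨rfl, by simp [zip_self_countP]⟩)
    · by_cases hjf : j < f.length
      · by_cases hjs : j < s.length
        · have hl := congrArg List.length he
          simp only [List.length_eraseIdx, hjf, hjs, if_pos] at hl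
          have hfs : f.length = s.length := by omega
          exact Or.inl (Or.inl ⟨hfs, (ham_iff f s hfs).mpr (Or.inr ⟨j, hjs, he⟩)⟩)
        · rw [eraseIdx_of_ge (by omega : s.length ≤ j)] at he
          have hl := congrArg List.length he
          simp only [List.length_eraseIdx, hjf, if_pos] at hl
          exact Or.inl (Or.inr ⟨by omega, j, hjf, he⟩)
      · rw [eraseIdx_of_ge (by omega : f.length ≤ j)] at he
        by_cases hjs : j < s.length
        · have hl := congrArg List.length he
          simp only [List.length_eraseIdx, hjs, if_pos] at hl
          exact Or.inr ⟨by omega, j, hjs, he.symm⟩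
        · rw [eraseIdx_of_ge (by omega : s.length ≤ j)] at he
          subst he
          exact Or.inl (Or.inl ⟨rfl, by simp [zip_self_countP]⟩)
  · rintro ((⟨hl, hc⟩ | ⟨hl, j, hj, he⟩) | ⟨hl, j, hj, he⟩)
    · rcases (ham_iff f s hl).mp hc with rfl | ⟨j, hj, he⟩
      · exact Or.inl rfl
      · exact Or.inr ⟨j, by omega, Or.inr (Or.inr he)⟩
    · exact Or.inr ⟨j, by omega, Or.inl he⟩
    · exact Or.inr ⟨j, by omega, Or.inr (Or.inl he)⟩

theorem D_iff (l : List String) :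
    D_has_chili l ↔ (pvNear 1 l = true ∧ pvNear 0 l = false) := by
  have hd1g := fun f s => hd_eq_guarded 1 (Or.inr rfl) gapFun (fun x => by simp [gapFun])
    (fun x f y s => by simpa using gapFun_cons x y f s) f s
  have hd0g := fun f s => hd_eq_guarded 0 (Or.inl rfl) delFun (fun x => by simp [delFun])
    (fun x f y s => by simpa using delFun_cons x y f s) f s
  constructor
  · rintro ⟨⟨t, ht, c, hc, hg⟩, hall⟩
    have h0 : pvNear 0 l = false := by
      rw [Bool.eq_false_iff]
      intro habs
      simp only [pvNear, List.any_eq_true, List.mem_cons, List.not_mem_nil, or_false] at habs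
      obtain ⟨u, hu, w, hw, hhd⟩ := habs
      have hclose : closeTo (PySem.Chars.lower u.toList) w := (closeTo_hd0 _ _).mpr hhd
      rcases hw with rfl | rfl
      · exact hall u hu "chili" (by simp [pvT]) hclose
      · exact hall u hu "chilies" (by simp [pvT]) hclose
    refine ⟨?_, h0⟩
    simp only [pvNear, List.any_eq_true, List.mem_cons, List.not_mem_nil, or_false]
    refine ⟨t, ht, c.toList, ?_, ?_⟩
    · simp only [pvT, List.mem_cons, List.not_mem_nil, or_false] at hc
      rcases hc with rfl | rfl
      · simp
      · simp
    · rw [hd1g]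
      simp only [guarded, Bool.or_eq_true, Bool.and_eq_true, beq_iff_eq]
      rcases hg with hg | hg
      · obtain ⟨hl', hgf⟩ := (gapAcc_gapFun _ _).mp hg
        exact Or.inl (Or.inr ⟨hl', hgf⟩)
      · obtain ⟨hl', hgf⟩ := (gapAcc_gapFun _ _).mp hg
        exact Or.inr ⟨hl', hgf⟩
  · rintro ⟨h1, h0⟩
    have hnoclose : ∀ t ∈ l, ∀ c ∈ pvT, ¬ closeTo (PySem.Chars.lower t.toList) c.toList := by
      intro t ht c hc hcl
      have hhd : hd 0 (PySem.Chars.lower t.toList) c.toList = true := (closeTo_hd0 _ _).mp hcl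
      have : pvNear 0 l = true := by
        simp only [pvNear, List.any_eq_true, List.mem_cons, List.not_mem_nil, or_false]
        simp only [pvT, List.mem_cons, List.not_mem_nil, or_false] at hc
        rcases hc with rfl | rfl
        · exact ⟨t, ht, "chili".toList, by simp, hhd⟩
        · exact ⟨t, ht, "chilies".toList, by simp, hhd⟩
      simp [this] at h0
    refine ⟨?_, hnoclose⟩
    simp only [pvNear, List.any_eq_true, List.mem_cons, List.not_mem_nil, or_false] at h1
    obtain ⟨t, ht, w, hw, hhd⟩ := h1
    rw [hd1g] at hhd
    simp only [guarded, Bool.or_eq_true, Bool.and_eq_true, beq_iff_eq] at hhd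
    have hw' : ∃ c ∈ pvT, c.toList = w := by
      rcases hw with rfl | rfl
      · exact ⟨"chili", by simp [pvT], rfl⟩
      · exact ⟨"chilies", by simp [pvT], rfl⟩
    obtain ⟨c, hc, rfl⟩ := hw'
    rcases hhd with (hham | ⟨hl', hgf⟩) | ⟨hl', hgf⟩
    · exfalso
      apply hnoclose t ht c hc
      rw [closeTo_hd0, hd0g]
      simp only [guarded, Bool.or_eq_true, Bool.and_eq_true, beq_iff_eq]
      exact Or.inl (Or.inl hham)
    · exact ⟨t, ht, c, hc, Or.inl ((gapAcc_gapFun _ _).mpr ⟨hl', hgf⟩)⟩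
    · exact ⟨t, ht, c, hc, Or.inr ((gapAcc_gapFun _ _).mpr ⟨hl', hgf⟩)⟩

-- ===== VERDICT (by name: the statement is the Claim_ definition above) =====
theorem has_chili_spec : Claim_unchanged_has_chili := by
  intro l _ hnd
  rw [hasChili_eq, hasChiliAlt_eq]
  rw [D_iff] at hnd
  cases hA : pvNear 1 l
  · cases hB : pvNear 0 l
    · rfl
    · exact absurd (pvNear_mono l hB) (by simp [hA])
  · cases hB : pvNear 0 l
    · exact absurd ⟨hA, hB⟩ hnd
    · rfl

theorem has_chili_changed : Claim_changed_has_chili := by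
  unfold Claim_changed_has_chili; decide

theorem has_chili_tight : Claim_exact_has_chili := by
  intro l _ hD
  rw [hasChili_eq, hasChiliAlt_eq]
  rw [D_iff] at hD
  rw [hD.1, hD.2]
  simp
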